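-- pv_equiv track=rewrite | github.com/qcs4tracy/NER-Project | crf_ner/template.py | get_dand
-- ===== SOURCE A (Python) =====
-- def get_dand(token, p):
--     bd = False
--     bdd = False
--     for c in token:
--         if c.isdigit():
--             bd = True
--         elif c == p:
--             bdd = True
--         else:
--             return False
--     return bd and bdd
-- ===== SOURCE B (Python) =====
-- def get_dand(token, p):
--     valid = all(c.isdigit() or c == p for c in token)
--     has_digit = any(c.isdigit() for c in token)
--     has_p = any(c == p for c in token)
--     return valid and has_digit and has_p
-- ===== Notes on version B (the rewrite author's own statement) =====
-- stated objective: simpler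
-- what changed: Replaces the fused early-exit two-flag state-machine loop with three independent stateless predicate scans (all chars valid, some digit present, separator present) combined by conjunction.
-- intended difference: On a nonempty all-digit token whose characters include the (digit) separator p, A returns False because its elif classifies every digit as a digit and never lets it count as the separator, while B returns True since the token really consists only of digits and p and contains both; B's is the intended reading of the digit-and-delimiter check. — e.g. on get_dand("5", "5"): A returns false, B returns true
import Mathlib
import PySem

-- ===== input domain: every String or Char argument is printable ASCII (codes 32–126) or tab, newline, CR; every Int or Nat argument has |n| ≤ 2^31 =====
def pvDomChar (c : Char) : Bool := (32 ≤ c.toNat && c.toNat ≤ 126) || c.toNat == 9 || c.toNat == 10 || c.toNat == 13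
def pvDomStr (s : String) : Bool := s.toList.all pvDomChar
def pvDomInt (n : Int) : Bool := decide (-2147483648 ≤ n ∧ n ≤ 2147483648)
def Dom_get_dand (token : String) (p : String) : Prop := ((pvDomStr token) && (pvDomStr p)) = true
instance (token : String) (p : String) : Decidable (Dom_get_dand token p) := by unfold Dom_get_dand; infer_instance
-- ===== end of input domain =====

-- B replaces A's fused early-exit two-flag loop with three independent stateless scans (simpler decomposition; same O(n) cost).

-- ===== PORT A =====
-- the for-loop with early return, carrying the two flags bd, bdd
def getDandLoop (p : String) : List Char → Bool → Bool → Bool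
  | [], bd, bdd => bd && bdd
  | c :: cs, bd, bdd =>
    if PySem.Chars.isdigit c then getDandLoop p cs true bdd
    else if String.ofList [c] == p then getDandLoop p cs bd true
    else false

def get_dand (token : String) (p : String) : Bool :=
  getDandLoop p token.toList false false

-- ===== PORT B =====
def get_dand_alt (token : String) (p : String) : Bool :=
  (token.toList.all (fun c => PySem.Chars.isdigit c || String.ofList [c] == p)) &&
  (token.toList.any (fun c => PySem.Chars.isdigit c)) &&
  (token.toList.any (fun c => String.ofList [c] == p))

-- ===== PRECONDITION & SPEC =====
-- On a nonempty all-digit token whose characters include the (digit) separator p, A returns False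
-- (its elif never lets a digit count as the separator) while B returns True (the token consists
-- only of digits and p and contains both); B's is the intended reading of the digit-and-delimiter check.
def D_get_dand (token : String) (p : String) : Prop :=
  token ≠ "" ∧ (∀ c ∈ token.toList, '0' ≤ c ∧ c ≤ '9') ∧ p.length = 1 ∧ p.toList ⊆ token.toList
instance (token : String) (p : String) : Decidable (D_get_dand token p) := by
  unfold D_get_dand; infer_instance

def Spec_get_dand (token : String) (p : String) (out : Bool) : Prop :=
  ¬ D_get_dand token p → out = get_dand_alt token p
instance (token : String) (p : String) (out : Bool) : Decidable (Spec_get_dand token p out) := by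
  unfold Spec_get_dand; infer_instance

def pvDiffWitness_get_dand : String × String := ("5", "5")
def pvDiffWitnessOut_get_dand : Bool × Bool := (false, true)

-- ===== CLAIM (what is proved, stated in full; the proofs are below) =====
def Claim_unchanged_get_dand : Prop :=
  ∀ (token : String) (p : String), Dom_get_dand token p → Spec_get_dand token p (get_dand token p)
def Claim_changed_get_dand : Prop :=
  Dom_get_dand (pvDiffWitness_get_dand.1) (pvDiffWitness_get_dand.2) ∧
  D_get_dand (pvDiffWitness_get_dand.1) (pvDiffWitness_get_dand.2) ∧
  get_dand (pvDiffWitness_get_dand.1) (pvDiffWitness_get_dand.2) = pvDiffWitnessOut_get_dand.1 ∧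
  get_dand_alt (pvDiffWitness_get_dand.1) (pvDiffWitness_get_dand.2) = pvDiffWitnessOut_get_dand.2 ∧
  pvDiffWitnessOut_get_dand.1 ≠ pvDiffWitnessOut_get_dand.2
def Claim_exact_get_dand : Prop :=
  ∀ (token : String) (p : String), Dom_get_dand token p → D_get_dand token p →
    get_dand token p ≠ get_dand_alt token p

-- ===== LEMMAS AND PROOFS =====

-- loop invariant: A's loop equals "all valid && (bd ∨ some digit) && (bdd ∨ some non-digit = p)"
theorem getDandLoop_eq (p : String) (cs : List Char) : ∀ (bd bdd : Bool),
    getDandLoop p cs bd bdd =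
      ((cs.all (fun c => PySem.Chars.isdigit c || String.ofList [c] == p)) &&
       (bd || cs.any (fun c => PySem.Chars.isdigit c)) &&
       (bdd || cs.any (fun c => !PySem.Chars.isdigit c && String.ofList [c] == p))) := by
  induction cs with
  | nil => intro bd bdd; simp [getDandLoop]
  | cons c cs ih =>
    intro bd bdd
    by_cases hd : PySem.Chars.isdigit c = true
    · simp [getDandLoop, hd, ih]
    · by_cases hp : (String.ofList [c] == p) = true
      · simp [getDandLoop, hd, hp, ih]
      · simp [getDandLoop, hd, hp]

-- D_ restated as the predicates the ports use: nonempty all-digit token containing p's character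
theorem D_iff (token p : String) :
    D_get_dand token p ↔
      (token.toList ≠ [] ∧ token.toList.all (fun c => PySem.Chars.isdigit c) = true ∧
       token.toList.any (fun c => String.ofList [c] == p) = true) := by
  unfold D_get_dand
  have hlen : p.length = p.toList.length := by simp
  constructor
  · rintro ⟨h1, h2, h3, h4⟩
    refine ⟨by simpa using h1, ?_, ?_⟩
    · simp only [List.all_eq_true]
      intro c hc
      have := h2 c hc
      simp [PySem.Chars.isdigit]
      omega
    · rw [hlen] at h3
      match hp : p.toList, h3 with
      | [d], _ =>
        have hd : d ∈ token.toList := h4 (by simp [hp])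
        refine List.any_eq_true.mpr ⟨d, hd, ?_⟩
        have : p = String.ofList [d] := by
          apply String.ext (h := ?_)
          rw [hp]
          exact (by simp : (String.ofList [d]).toList = [d]).symm
        simp [this]
  · rintro ⟨h1, h2, h3⟩
    obtain ⟨c, hc, hcp⟩ := List.any_eq_true.mp h3
    have hp : p = String.ofList [c] := by
      have := eq_of_beq hcp; exact this.symm
    refine ⟨by simpa using h1, ?_, ?_, ?_⟩
    · intro d hd
      have := (List.all_eq_true.mp h2) d hd
      simp [PySem.Chars.isdigit] at this
      omega
    · rw [hp]
      have h2 : (String.ofList [c]).toList = [c] := by simp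
      calc (String.ofList [c]).length = (String.ofList [c]).toList.length := by simp
        _ = 1 := by rw [h2]; rfl
    · intro d hd
      rw [hp] at hd
      have h2 : (String.ofList [c]).toList = [c] := by simp
      rw [h2] at hd
      simp at hd
      simpa [hd] using hc

-- outside D_, A's "some non-digit = p" test coincides with B's "some char = p" test
theorem any_p_eq (token : String) (p : String)
    (hnD : ¬ (token.toList ≠ [] ∧ token.toList.all (fun c => PySem.Chars.isdigit c) = true ∧
              token.toList.any (fun c => String.ofList [c] == p) = true)) :
    ((token.toList.all (fun c => PySem.Chars.isdigit c || String.ofList [c] == p)) &&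
     (token.toList.any (fun c => PySem.Chars.isdigit c)) &&
     (token.toList.any (fun c => !PySem.Chars.isdigit c && String.ofList [c] == p))) =
    ((token.toList.all (fun c => PySem.Chars.isdigit c || String.ofList [c] == p)) &&
     (token.toList.any (fun c => PySem.Chars.isdigit c)) &&
     (token.toList.any (fun c => String.ofList [c] == p))) := by
  set l := token.toList with hl
  by_cases hv : l.all (fun c => PySem.Chars.isdigit c || String.ofList [c] == p) = true
  · by_cases hdg : l.any (fun c => PySem.Chars.isdigit c) = true
    · simp only [hv, hdg, Bool.true_and]
      by_cases hp : l.any (fun c => String.ofList [c] == p) = true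
      · -- some char equals p; since hnD fails, not all chars are digits
        have hne : l ≠ [] := by
          intro h; rw [h] at hp; simp at hp
        have hnotall : ¬ l.all (fun c => PySem.Chars.isdigit c) = true := by
          intro hall; exact hnD ⟨hne, hall, hp⟩
        -- so some char is a non-digit; by validity it equals p
        simp only [List.all_eq_true, Bool.or_eq_true] at hv
        simp only [List.all_eq_true, not_forall] at hnotall
        obtain ⟨c, hc, hcnd⟩ := hnotall
        have hcp : (String.ofList [c] == p) = true := by
          rcases hv c hc with h | h
          · exact absurd h hcnd
          · exact h
        rw [hp]
        exact List.any_eq_true.mpr ⟨c, hc, by simp [hcnd, hcp]⟩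
      · have hpf : l.any (fun c => String.ofList [c] == p) = false := Bool.eq_false_iff.mpr hp
        have hp' : ∀ c ∈ l, ¬ ((String.ofList [c] == p) = true) := by
          simpa [List.any_eq_false] using hpf
        rw [hpf]
        simp only [List.any_eq_false]
        intro c hc; simp [hp' c hc]
    · have h : l.any (fun c => PySem.Chars.isdigit c) = false := Bool.eq_false_iff.mpr hdg
      simp [h]
  · have h : l.all (fun c => PySem.Chars.isdigit c || String.ofList [c] == p) = false := Bool.eq_false_iff.mpr hv
    simp [h]

-- ===== VERDICT (by name: the statements are the Claim_ definitions above) =====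
theorem get_dand_spec : Claim_unchanged_get_dand := by
  intro token p _ hnD
  unfold get_dand get_dand_alt
  rw [getDandLoop_eq]
  simpa using any_p_eq token p ((D_iff token p).not.mp hnD)

theorem get_dand_changed : Claim_changed_get_dand := by
  unfold Claim_changed_get_dand
  refine ⟨by decide, ?_, by decide, by decide, by decide⟩
  unfold D_get_dand pvDiffWitness_get_dand
  refine ⟨by decide, ?_, by decide, ?_⟩
  · intro c hc
    simp at hc
    subst hc
    decide
  · intro c hc
    simpa using hc

theorem get_dand_tight : Claim_exact_get_dand := by
  intro token p _ hD h
  obtain ⟨hne, hall, hp⟩ := (D_iff token p).mp hD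
  unfold get_dand get_dand_alt at h
  rw [getDandLoop_eq] at h
  have hv : token.toList.all (fun c => PySem.Chars.isdigit c || String.ofList [c] == p) = true := by
    simp only [List.all_eq_true] at hall ⊢
    intro c hc; simp [hall c hc]
  have hdg : token.toList.any (fun c => PySem.Chars.isdigit c) = true := by
    obtain ⟨c, hc⟩ := List.exists_mem_of_ne_nil _ hne
    exact List.any_eq_true.mpr ⟨c, hc, by simpa using (List.all_eq_true.mp hall) c hc⟩
  have hnp : token.toList.any (fun c => !PySem.Chars.isdigit c && String.ofList [c] == p) = false := by
    simp only [List.any_eq_false]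
    intro c hc
    simp [(List.all_eq_true.mp hall) c hc]
  rw [hv, hdg, hnp, hp] at h
  simp at h
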